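-- pv_equiv track=rewrite | github.com/rdwr-namikb/mcp-market | app.py | parse_tools_output
-- ===== SOURCE A (Python) =====
-- def parse_tools_output(output: str) -> list:
--     """Parse the output from mcp_tool_inspector.py into a structured format"""
--     tools = []
--     current_tool = None
--     collecting_description = False
--     description_lines = []
--
--     lines = output.split('\n')
--     for i, line in enumerate(lines):
--         line_stripped = line.strip()
--
--         # Skip header lines and empty lines at start
--         if line_stripped == 'Discovered MCP tools:':
--             continue
--
--         # Start of a new tool
--         if line_stripped.startswith('- Name:'):
--             # Save previous tool if exists
--             if current_tool:
--                 if description_lines: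
--                     # Join description lines, preserving paragraph breaks
--                     current_tool['description'] = '\n'.join(description_lines).strip()
--                 tools.append(current_tool)
--
--             # Start new tool
--             current_tool = {
--                 'name': line_stripped.replace('- Name:', '').strip(),
--                 'description': None,
--                 'origin': None
--             }
--             collecting_description = False
--             description_lines = []
--
--         # Description line - can be multi-line (starts with "  Description:")
--         elif line.startswith('  Description:') and current_tool:
--             # Remove "  Description:" prefix and get the rest
--             desc_text = line.replace('  Description:', '', 1).strip()
--             if desc_text:
--                 description_lines.append(desc_text)
--             collecting_description = True
--
--         # Collecting description continuation (lines after Description: until Declared in:)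
--         elif collecting_description and current_tool:
--             # Stop if we hit "  Declared in:"
--             if line.startswith('  Declared in:'):
--                 collecting_description = False
--                 current_tool['origin'] = line.replace('  Declared in:', '').strip()
--             # Continue collecting description lines
--             # All lines between "  Description:" and "  Declared in:" are part of description
--             # unless they start with "- Name:" (which would be a new tool)
--             elif not line_stripped.startswith('- Name:'):
--                 # Add the line as-is (preserving formatting)
--                 # Lines can be empty (paragraph breaks) or have content
--                 description_lines.append(line)
--
--         # Declared in line (when not collecting description - shouldn't happen but just in case)
--         elif line_stripped.startswith('Declared in:') and current_tool and not collecting_description: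
--             current_tool['origin'] = line_stripped.replace('Declared in:', '').strip()
--
--     # Save last tool
--     if current_tool:
--         if description_lines:
--             current_tool['description'] = '\n'.join(description_lines).strip()
--         tools.append(current_tool)
--
--     return tools
-- ===== SOURCE B (Python) =====
-- def _is_name(line):
--     return line.strip().startswith('- Name:')
--
--
-- def _split_blocks(lines):
--     """Cut lines into (head, body) blocks, one block per '- Name:' line;
--     lines before the first '- Name:' line are dropped."""
--     blocks = []
--     i = 0
--     while i < len(lines) and not _is_name(lines[i]):
--         i += 1
--     while i < len(lines):
--         j = i + 1
--         while j < len(lines) and not _is_name(lines[j]):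
--             j += 1
--         blocks.append((lines[i], lines[i + 1:j]))
--         i = j
--     return blocks
--
--
-- def _parse_block(head, body):
--     name = head.strip().replace('- Name:', '').strip()
--     desc_lines = []
--     origin = None
--     collecting = False
--     for line in body:
--         stripped = line.strip()
--         if stripped == 'Discovered MCP tools:':
--             continue
--         if line.startswith('  Description:'):
--             text = line.replace('  Description:', '', 1).strip()
--             if text:
--                 desc_lines.append(text)
--             collecting = True
--         elif collecting:
--             if line.startswith('  Declared in:'):
--                 collecting = False
--                 origin = line.replace('  Declared in:', '').strip()
--             else:
--                 desc_lines.append(line)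
--         elif stripped.startswith('Declared in:'):
--             origin = stripped.replace('Declared in:', '').strip()
--     description = '\n'.join(desc_lines).strip() if desc_lines else None
--     return {'name': name, 'description': description, 'origin': origin}
--
--
-- def parse_tools_output(output: str) -> list:
--     lines = output.split('\n')
--     return [_parse_block(head, body) for head, body in _split_blocks(lines)]
-- ===== Notes on version B (the rewrite author's own statement) =====
-- stated objective: alternative
-- what changed: Replaces A's single flat state machine (current_tool dict, flush-on-next-name, end-of-loop flush) with a boundary pass that first cuts the lines into per-tool blocks at '- Name:' lines and then parses each block independently with a small local scanner.
import Mathlib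
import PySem

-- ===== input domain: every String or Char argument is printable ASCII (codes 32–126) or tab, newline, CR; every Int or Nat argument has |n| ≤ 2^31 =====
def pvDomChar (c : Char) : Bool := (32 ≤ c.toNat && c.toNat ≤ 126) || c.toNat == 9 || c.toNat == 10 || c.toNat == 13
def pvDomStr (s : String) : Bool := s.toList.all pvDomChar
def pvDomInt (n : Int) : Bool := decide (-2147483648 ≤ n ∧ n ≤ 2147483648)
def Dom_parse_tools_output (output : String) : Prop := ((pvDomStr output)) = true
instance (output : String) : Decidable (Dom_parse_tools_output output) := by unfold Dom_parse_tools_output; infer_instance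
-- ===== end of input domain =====

-- B replaces A's flat state machine (current_tool dict + flush-on-next-name + end flush) by a
-- boundary pass cutting the lines into per-tool blocks at '- Name:' lines, each parsed independently.

-- ===== PORT A =====

-- Hand-written port of Python's s.replace(old, new, 1) (count = 1: only the leftmost occurrence is
-- replaced); exact: PySem.Str.find is the index of the first occurrence (-1 if absent) and
-- PySem.List.slice are Python slices.
def pyReplaceOnce (s old new : String) : String :=
  let i := PySem.Str.find s old
  if i < 0 then s
  else String.ofList (PySem.List.slice s.toList none (some i) ++ new.toList ++
                  PySem.List.slice s.toList (some (i + PySem.Str.len old)) none)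

-- one iteration of A's `for i, line in enumerate(lines)` body; state = (tools, current_tool, collecting_description, description_lines)
def pvStepA
    (st : List (PySem.Dict String (Option String)) × Option (PySem.Dict String (Option String)) × Bool × List String)
    (line : String) :
    List (PySem.Dict String (Option String)) × Option (PySem.Dict String (Option String)) × Bool × List String :=
  let (tools, current, collecting, descs) := st
  let ls := PySem.Str.strip line
  if ls == "Discovered MCP tools:" then (tools, current, collecting, descs)
  else if PySem.Str.startswith ls "- Name:" then
    let tools' :=
      match current with
      | none => tools
      | some ct =>
          tools ++ [if descs ≠ [] then
                      PySem.Dict.insert ct "description" (some (PySem.Str.strip (PySem.Str.join "\n" descs)))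
                    else ct]
    (tools',
     some (PySem.Dict.mk [("name", some (PySem.Str.strip (PySem.Str.replace ls "- Name:" ""))),
                          ("description", none), ("origin", none)]),
     false, [])
  else if PySem.Str.startswith line "  Description:" && current.isSome then
    let descText := PySem.Str.strip (pyReplaceOnce line "  Description:" "")
    (tools, current, true, if descText ≠ "" then descs ++ [descText] else descs)
  else if collecting && current.isSome then
    if PySem.Str.startswith line "  Declared in:" then
      (tools,
       current.map (fun ct =>
         PySem.Dict.insert ct "origin" (some (PySem.Str.strip (PySem.Str.replace line "  Declared in:" "")))),
       false, descs)
    else if PySem.Str.startswith ls "- Name:" then (tools, current, collecting, descs)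
    else (tools, current, collecting, descs ++ [line])
  else if PySem.Str.startswith ls "Declared in:" && current.isSome && !collecting then
    (tools,
     current.map (fun ct =>
       PySem.Dict.insert ct "origin" (some (PySem.Str.strip (PySem.Str.replace ls "Declared in:" "")))),
     collecting, descs)
  else (tools, current, collecting, descs)

def parse_tools_output (output : String) : List (List (String × Option String)) :=
  let lines := (PySem.Str.split? output "\n").getD []   -- sep "\n" ≠ "": split? is some here
  let st := lines.foldl pvStepA ([], none, false, [])
  (match st.2.1 with
   | none => st.1
   | some ct =>
       st.1 ++ [if st.2.2.2 ≠ [] then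
                  PySem.Dict.insert ct "description" (some (PySem.Str.strip (PySem.Str.join "\n" st.2.2.2)))
                else ct]).map (fun d => PySem.Dict.items d)

-- ===== PORT B =====

def pvIsName (line : String) : Bool := PySem.Str.startswith (PySem.Str.strip line) "- Name:"

-- one iteration of _parse_block's loop; state = (desc_lines, origin, collecting)
def pvStepB (st : List String × Option String × Bool) (line : String) :
    List String × Option String × Bool :=
  let (descs, origin, collecting) := st
  let stripped := PySem.Str.strip line
  if stripped == "Discovered MCP tools:" then (descs, origin, collecting)
  else if PySem.Str.startswith line "  Description:" then
    let text := PySem.Str.strip (pyReplaceOnce line "  Description:" "")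
    (if text ≠ "" then descs ++ [text] else descs, origin, true)
  else if collecting then
    if PySem.Str.startswith line "  Declared in:" then
      (descs, some (PySem.Str.strip (PySem.Str.replace line "  Declared in:" "")), false)
    else (descs ++ [line], origin, collecting)
  else if PySem.Str.startswith stripped "Declared in:" then
    (descs, some (PySem.Str.strip (PySem.Str.replace stripped "Declared in:" "")), collecting)
  else (descs, origin, collecting)

def pvParseBlock (head : String) (body : List String) : List (String × Option String) :=
  let name := PySem.Str.strip (PySem.Str.replace (PySem.Str.strip head) "- Name:" "")
  let st := body.foldl pvStepB ([], none, false)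
  [("name", some name),
   ("description", if st.1 ≠ [] then some (PySem.Str.strip (PySem.Str.join "\n" st.1)) else none),
   ("origin", st.2.1)]

-- _split_blocks: the inner `while j < len(lines) and not _is_name(lines[j])` scan is the
-- takeWhile/dropWhile split of the remaining lines
def pvSplitBlocks : List String → List (String × List String)
  | [] => []
  | h :: t =>
      (h, t.takeWhile (fun l => !pvIsName l)) :: pvSplitBlocks (t.dropWhile (fun l => !pvIsName l))
termination_by l => l.length
decreasing_by
  simpa using Nat.lt_succ_of_le (List.length_dropWhile_le _ _)

def parse_tools_output_alt (output : String) : List (List (String × Option String)) :=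
  -- lines = output.split('\n');  sep "\n" ≠ "": split? is some here
  (pvSplitBlocks ((((PySem.Str.split? output "\n").getD []).dropWhile (fun l => !pvIsName l)))).map
    (fun b => pvParseBlock b.1 b.2)

-- ===== PRECONDITION & SPEC =====
def Spec_parse_tools_output (output : String) (out : List (List (String × Option String))) : Prop := out = parse_tools_output_alt output
instance (output : String) (out : List (List (String × Option String))) : Decidable (Spec_parse_tools_output output out) := by unfold Spec_parse_tools_output; infer_instance

-- ===== CLAIM (what is proved, stated in full; the proofs are below) =====
def Claim_equal_parse_tools_output : Prop := ∀ (output : String), Dom_parse_tools_output output → Spec_parse_tools_output output (parse_tools_output output)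

-- ===== LEMMAS AND PROOFS =====

-- the current_tool dict always has this shape between two '- Name:' lines
def pvCt (n : String) (o : Option String) : PySem.Dict String (Option String) :=
  PySem.Dict.mk [("name", some n), ("description", none), ("origin", o)]

-- the tool dict produced from a name and a final block state
def pvTool (n : String) (st : List String × Option String × Bool) : List (String × Option String) :=
  [("name", some n),
   ("description", if st.1 ≠ [] then some (PySem.Str.strip (PySem.Str.join "\n" st.1)) else none),
   ("origin", st.2.1)]

-- A's final flush, as applied by parse_tools_output to the fold result
def pvFinA (st : List (PySem.Dict String (Option String)) × Option (PySem.Dict String (Option String)) × Bool × List String) :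
    List (List (String × Option String)) :=
  (match st.2.1 with
   | none => st.1
   | some ct =>
       st.1 ++ [if st.2.2.2 ≠ [] then
                  PySem.Dict.insert ct "description" (some (PySem.Str.strip (PySem.Str.join "\n" st.2.2.2)))
                else ct]).map (fun d => PySem.Dict.items d)

lemma pvParseBlock_eq (head : String) (body : List String) :
    pvParseBlock head body
      = pvTool (PySem.Str.strip (PySem.Str.replace (PySem.Str.strip head) "- Name:" ""))
          (body.foldl pvStepB ([], none, false)) := rfl

lemma pvCt_insert_origin (n : String) (o : Option String) (v : Option String) :
    PySem.Dict.insert (pvCt n o) "origin" v = pvCt n v := by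
  simp [pvCt, PySem.Dict.insert]

lemma pvCt_flush (n : String) (o : Option String) (descs : List String) :
    PySem.Dict.items
        (if descs ≠ [] then
           PySem.Dict.insert (pvCt n o) "description" (some (PySem.Str.strip (PySem.Str.join "\n" descs)))
         else pvCt n o)
      = pvTool n (descs, o, true) := by
  cases descs with
  | nil => simp [pvCt, pvTool]
  | cons h t => simp [pvCt, pvTool, PySem.Dict.insert, PySem.Dict.contains]

lemma stepA_none (tools : List (PySem.Dict String (Option String))) (c : Bool) (d : List String)
    (line : String) (h : pvIsName line = false) :
    pvStepA (tools, none, c, d) line = (tools, none, c, d) := by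
  simp only [pvIsName] at h
  unfold pvStepA
  simp only [Option.isSome_none, Bool.and_false, Bool.false_eq_true, if_false, h]
  split_ifs <;> rfl

lemma foldA_none (ls : List String) (h : ∀ l ∈ ls, pvIsName l = false)
    (tools : List (PySem.Dict String (Option String))) (c : Bool) (d : List String) :
    ls.foldl pvStepA (tools, none, c, d) = (tools, none, c, d) := by
  induction ls with
  | nil => rfl
  | cons x xs ih =>
      rw [List.foldl_cons, stepA_none _ _ _ _ (h x (List.mem_cons_self))]
      exact ih (fun l hl => h l (List.mem_cons_of_mem _ hl))

lemma stepA_block (tools : List (PySem.Dict String (Option String))) (n : String) (o : Option String)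
    (coll : Bool) (descs : List String) (line : String) (h : pvIsName line = false) :
    pvStepA (tools, some (pvCt n o), coll, descs) line
      = (tools, some (pvCt n (pvStepB (descs, o, coll) line).2.1),
         (pvStepB (descs, o, coll) line).2.2, (pvStepB (descs, o, coll) line).1) := by
  simp only [pvIsName] at h
  unfold pvStepA pvStepB
  simp only [Option.isSome_some, Bool.and_true, h, Bool.false_eq_true, if_false]
  split_ifs <;> simp_all [pvCt_insert_origin]

lemma header_ne_of_isName (l : String) (h : pvIsName l = true) :
    (PySem.Str.strip l == "Discovered MCP tools:") = false := by
  by_contra hc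
  simp only [Bool.not_eq_false, beq_iff_eq] at hc
  rw [pvIsName, hc] at h
  exact absurd h (by decide)

lemma stepA_name (tools : List (PySem.Dict String (Option String))) (n : String) (o : Option String)
    (coll : Bool) (descs : List String) (l : String) (hl : pvIsName l = true) :
    pvStepA (tools, some (pvCt n o), coll, descs) l
      = (tools ++ [if descs ≠ [] then
                     PySem.Dict.insert (pvCt n o) "description" (some (PySem.Str.strip (PySem.Str.join "\n" descs)))
                   else pvCt n o],
         some (pvCt (PySem.Str.strip (PySem.Str.replace (PySem.Str.strip l) "- Name:" "")) none),
         false, []) := by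
  have hhdr := header_ne_of_isName l hl
  simp only [pvIsName] at hl
  unfold pvStepA
  simp only [hhdr, Bool.false_eq_true, if_false, hl, if_true, pvCt]

lemma stepA_name_none (tools : List (PySem.Dict String (Option String)))
    (coll : Bool) (descs : List String) (l : String) (hl : pvIsName l = true) :
    pvStepA (tools, none, coll, descs) l
      = (tools, some (pvCt (PySem.Str.strip (PySem.Str.replace (PySem.Str.strip l) "- Name:" "")) none),
         false, []) := by
  have hhdr := header_ne_of_isName l hl
  simp only [pvIsName] at hl
  unfold pvStepA
  simp only [hhdr, Bool.false_eq_true, if_false, hl, if_true, pvCt]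

lemma runA_main (lines : List String) :
    ∀ (tools : List (PySem.Dict String (Option String))) (n : String) (o : Option String)
      (coll : Bool) (descs : List String),
    pvFinA (lines.foldl pvStepA (tools, some (pvCt n o), coll, descs))
      = tools.map (fun d => PySem.Dict.items d)
        ++ pvTool n ((lines.takeWhile (fun l => !pvIsName l)).foldl pvStepB (descs, o, coll))
        :: (pvSplitBlocks (lines.dropWhile (fun l => !pvIsName l))).map (fun b => pvParseBlock b.1 b.2) := by
  induction lines with
  | nil =>
      intro tools n o coll descs
      simp only [List.foldl_nil, List.takeWhile_nil, List.dropWhile_nil, pvSplitBlocks,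
        List.map_nil, pvFinA]
      rw [List.map_append]
      congr 1
      simpa using pvCt_flush n o descs
  | cons l rest ih =>
      intro tools n o coll descs
      by_cases hl : pvIsName l = true
      · rw [List.foldl_cons, stepA_name _ _ _ _ _ _ hl, ih]
        simp only [List.takeWhile_cons, List.dropWhile_cons, hl, Bool.not_true, Bool.false_eq_true,
          if_false, List.foldl_nil, pvSplitBlocks, List.map_cons, List.map_append,
          pvParseBlock_eq, List.cons_append, List.append_assoc]
        congr 1
        simpa using pvCt_flush n o descs
      · have hl' : pvIsName l = false := by simpa using hl
        rw [List.foldl_cons, stepA_block _ _ _ _ _ _ hl', ih]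
        simp [hl']

-- ===== VERDICT (by name: the statement is the Claim_ definition above) =====
theorem parse_tools_output_spec : Claim_equal_parse_tools_output := by
  intro output _
  unfold Spec_parse_tools_output
  show pvFinA (((PySem.Str.split? output "\n").getD []).foldl pvStepA ([], none, false, []))
      = parse_tools_output_alt output
  unfold parse_tools_output_alt
  have hsplit : ((PySem.Str.split? output "\n").getD []).foldl pvStepA ([], none, false, [])
      = (((PySem.Str.split? output "\n").getD []).dropWhile (fun l => !pvIsName l)).foldl
          pvStepA ([], none, false, []) := by
    conv_lhs => rw [← List.takeWhile_append_dropWhile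
      (p := fun l => !pvIsName l) (l := (PySem.Str.split? output "\n").getD [])]
    rw [List.foldl_append,
      foldA_none _ (fun l hl => by simpa using List.mem_takeWhile_imp hl) _ _ _]
  rw [hsplit]
  cases hdrop : ((PySem.Str.split? output "\n").getD []).dropWhile (fun l => !pvIsName l) with
  | nil => simp [pvFinA, pvSplitBlocks]
  | cons l rest =>
      have hne : ((PySem.Str.split? output "\n").getD []).dropWhile (fun l => !pvIsName l) ≠ [] := by
        rw [hdrop]; exact List.cons_ne_nil _ _
      have hname : pvIsName l = true := by
        have hhead : (((PySem.Str.split? output "\n").getD []).dropWhile (fun l => !pvIsName l)).head hne = l := by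
          have h0 := congrArg List.head? hdrop
          rw [List.head?_eq_some_head hne] at h0
          simpa using h0
        have h2 := List.head_dropWhile_not (fun l => !pvIsName l) hne
        rw [hhead] at h2
        simpa using h2
      rw [List.foldl_cons, stepA_name_none _ _ _ _ hname, runA_main]
      simp only [pvSplitBlocks, List.map_cons, List.map_nil, List.nil_append, pvParseBlock_eq]
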